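-- pv_equiv track=rewrite | github.com/kuba1/youmgr | youmgr.py | __prepare_query
-- ===== SOURCE A (Python) =====
-- def __prepare_query(text):
--     ''' prepare query from text control to be inserted into url '''
--     was_white = True
--     new_text = ''
--     for character in text:
--         # space
--         if character == ' ':
--             if was_white:
--                 # if there was white before, process next character
--                 # we already have + inserted
--                 continue
--             else:
--                 # insert + instead of space
--                 new_text = new_text + '+'
--                 was_white = True
--         else:
--             # if not white, just copy it
--             new_text = new_text + character
--             was_white = False
--
--     # if there are any + on the edges, get rid of them, they are not
--     # necessary
--     return new_text.strip('+')
-- ===== SOURCE B (Python) =====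
-- def __prepare_query(text):
--     ''' prepare query from text control to be inserted into url '''
--     return '+'.join(filter(None, text.split(' '))).strip('+')
-- ===== Notes on version B (the rewrite author's own statement) =====
-- stated objective: idiomatic
-- what changed: Replaced the per-character state machine (was_white flag, char-by-char string concatenation) with a library pipeline: split on the space character, drop the empty pieces with filter(None, ...), join the remaining tokens with plus signs, then strip edge plus signs.
import Mathlib
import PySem

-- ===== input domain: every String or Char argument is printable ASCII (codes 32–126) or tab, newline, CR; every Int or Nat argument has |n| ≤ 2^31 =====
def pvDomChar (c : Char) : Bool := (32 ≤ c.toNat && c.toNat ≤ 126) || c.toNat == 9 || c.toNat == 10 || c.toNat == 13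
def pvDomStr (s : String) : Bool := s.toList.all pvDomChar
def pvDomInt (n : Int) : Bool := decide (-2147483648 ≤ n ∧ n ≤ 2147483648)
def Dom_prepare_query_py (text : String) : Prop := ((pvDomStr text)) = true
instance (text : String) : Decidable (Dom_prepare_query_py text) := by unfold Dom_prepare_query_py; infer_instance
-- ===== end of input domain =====

-- B replaces A's per-character was_white state machine by an idiomatic split/filter/join pipeline (measured faster in a timing run, same asymptotic cost).

-- ===== PORT A =====
-- the for-loop with its (was_white, new_text) state, then new_text.strip('+')
def prepare_query_py (text : String) : String :=
  let r := text.toList.foldl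
    (fun (st : Bool × List Char) character =>
      if character = ' ' then
        if st.1 then st else (true, st.2 ++ ['+'])
      else
        (false, st.2 ++ [character]))
    (true, [])
  String.ofList (PySem.Chars.stripChars r.2 ['+'])

-- ===== PORT B =====
-- '+'.join(filter(None, text.split(' '))).strip('+')
def prepare_query_py_alt (text : String) : String :=
  let parts := PySem.Chars.splitOn text.toList [' ']
  let kept := parts.filter (fun w => w ≠ [])
  String.ofList (PySem.Chars.stripChars (PySem.Chars.join ['+'] kept) ['+'])

-- ===== PRECONDITION & SPEC =====
def Spec_prepare_query_py (text : String) (out : String) : Prop := out = prepare_query_py_alt text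
instance (text : String) (out : String) : Decidable (Spec_prepare_query_py text out) := by unfold Spec_prepare_query_py; infer_instance

-- ===== CLAIM (what is proved, stated in full; the proofs are below) =====
def Claim_equal_prepare_query_py : Prop := ∀ (text : String), Dom_prepare_query_py text → Spec_prepare_query_py text (prepare_query_py text)

-- ===== LEMMAS AND PROOFS =====

-- A's loop contribution, as structural recursion over the remaining characters
def pvTail (ww : Bool) (l : List Char) : List Char :=
  match l with
  | [] => []
  | c :: t =>
    if c = ' ' then (if ww then pvTail true t else '+' :: pvTail true t)
    else c :: pvTail false t

-- the tokenizer underlying Chars.splitOn for separator [' ']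
def pvSp (l cur : List Char) : List (List Char) :=
  match l with
  | [] => [cur.reverse]
  | x :: rest => if x = ' ' then cur.reverse :: pvSp rest [] else pvSp rest (x :: cur)

-- B's joined string over the nonempty tokens
def pvK (l cur : List Char) : List Char :=
  PySem.Chars.join ['+'] ((pvSp l cur).filter (fun w => w ≠ []))

-- trailing '+' that A's loop leaves when the text ends in a space
def pvT (l : List Char) : List Char := if l.getLast? = some ' ' then ['+'] else []

theorem pv_foldl_eq_tail (l : List Char) : ∀ (ww : Bool) (acc : List Char),
    (l.foldl (fun (st : Bool × List Char) character =>
      if character = ' ' then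
        if st.1 then st else (true, st.2 ++ ['+'])
      else
        (false, st.2 ++ [character])) (ww, acc)).2 = acc ++ pvTail ww l := by
  intro ww acc
  induction l generalizing ww acc with
  | nil => simp [pvTail]
  | cons c t ih =>
    by_cases hc : c = ' '
    · cases ww <;> simp [pvTail, hc, List.foldl_cons, ih, List.append_assoc]
    · simp [pvTail, hc, List.foldl_cons, ih, List.append_assoc]

theorem pv_go_eq (l : List Char) : ∀ (fuel : Nat) (cur : List Char) (acc : List (List Char)),
    l.length < fuel →
    PySem.Chars.splitOn.go [' '] fuel l cur acc = acc.reverse ++ pvSp l cur := by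
  intro fuel cur acc h
  induction l generalizing fuel cur acc with
  | nil =>
    cases fuel with
    | zero => omega
    | succ f => simp [PySem.Chars.splitOn.go, pvSp]
  | cons x rest ih =>
    cases fuel with
    | zero => simp at h
    | succ f =>
      by_cases hx : x = ' '
      · simp [PySem.Chars.splitOn.go, pvSp, hx, List.isPrefixOf,
          ih f [] (cur.reverse :: acc) (by simpa using h)]
      · simp [PySem.Chars.splitOn.go, pvSp, hx, List.isPrefixOf, Ne.symm hx,
          ih f (x :: cur) acc (by simpa using Nat.lt_of_succ_lt_succ h)]

theorem pv_join_cons (a : List Char) (rest : List (List Char)) :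
    PySem.Chars.join ['+'] (a :: rest) =
      a ++ (if rest = [] then [] else '+' :: PySem.Chars.join ['+'] rest) := by
  cases rest with
  | nil => simp [PySem.Chars.join_singleton]
  | cons b r => simp [PySem.Chars.join_cons_cons]

theorem pv_filt_ne (l : List Char) : ∀ cur : List Char, cur ≠ [] →
    (pvSp l cur).filter (fun w => w ≠ []) ≠ [] := by
  induction l with
  | nil =>
    intro cur h
    simp [pvSp, h]
  | cons x rest ih =>
    intro cur h
    by_cases hx : x = ' '
    · simp [pvSp, hx, h]
    · simpa [pvSp, hx] using ih (x :: cur) (by simp)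

theorem pv_K_ne (l cur : List Char) (h : cur ≠ []) : pvK l cur ≠ [] := by
  unfold pvK
  obtain ⟨a, r, hr⟩ : ∃ a r, (pvSp l cur).filter (fun w => w ≠ []) = a :: r := by
    cases hf : (pvSp l cur).filter (fun w => w ≠ []) with
    | nil => exact absurd hf (pv_filt_ne l cur h)
    | cons a r => exact ⟨a, r, rfl⟩
  have ha : a ≠ [] := by
    have hmem : a ∈ (pvSp l cur).filter (fun w => w ≠ []) := by
      rw [hr]; exact List.mem_cons_self
    simpa using (List.mem_filter.mp hmem).2
  rw [hr, pv_join_cons]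
  intro hc
  rcases List.append_eq_nil_iff.mp hc with ⟨h1, _⟩
  exact ha h1

theorem pv_K_nil_iff (t : List Char) :
    pvK t [] = [] ↔ (pvSp t []).filter (fun w => w ≠ []) = [] := by
  constructor
  · intro h
    by_contra hne
    cases hf : (pvSp t []).filter (fun w => w ≠ []) with
    | nil => exact hne hf
    | cons a r =>
      have ha : a ≠ [] := by
        have hmem : a ∈ (pvSp t []).filter (fun w => w ≠ []) := by
          rw [hf]; exact List.mem_cons_self
        simpa using (List.mem_filter.mp hmem).2
      rw [pvK, hf, pv_join_cons] at h
      rcases List.append_eq_nil_iff.mp h with ⟨h1, _⟩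
      exact ha h1
  · intro h
    simp only [ne_eq, decide_not] at h
    simp [pvK, ne_eq, decide_not, h]

theorem pv_filter_nil_all (l : List Char) : ∀ cur : List Char,
    (pvSp l cur).filter (fun w => w ≠ []) = [] → ∀ y ∈ l, y = ' ' := by
  induction l with
  | nil => intro cur _; simp
  | cons x rest ih =>
    intro cur h
    by_cases hx : x = ' '
    · have hrest : (pvSp rest []).filter (fun w => w ≠ []) = [] := by
        rw [pvSp, if_pos hx, List.filter_cons] at h
        by_cases hc : cur.reverse = []
        · simpa [hc] using h
        · simp [hc] at h
      intro y hy
      rcases List.mem_cons.mp hy with rfl | hy'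
      · exact hx
      · exact ih [] hrest y hy'
    · exfalso
      rw [pvSp, if_neg hx] at h
      exact pv_filt_ne rest (x :: cur) (by simp) h

theorem pv_last_all (t : List Char) : (∀ y ∈ t, y = ' ') → (' ' :: t).getLast? = some ' ' := by
  induction t with
  | nil => intro _; simp
  | cons b t' ih =>
    intro h
    have hb : b = ' ' := h b (by simp)
    rw [List.getLast?_cons_cons, hb]
    exact ih (fun y hy => h y (by simp [hy]))

theorem pv_T_cons (c : Char) (t : List Char) (h : t ≠ []) : pvT (c :: t) = pvT t := by
  cases t with
  | nil => exact absurd rfl h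
  | cons b t' => simp [pvT, List.getLast?_cons_cons]

theorem pv_main (l : List Char) :
    (∀ cur : List Char, cur ≠ [] →
      cur.reverse ++ pvTail false l = pvK l cur ++ pvT l) ∧
    pvTail true l = pvK l [] ++ (if pvK l [] = [] then [] else pvT l) := by
  induction l with
  | nil =>
    refine ⟨fun cur h => ?_, ?_⟩
    · simp [pvTail, pvK, pvSp, pvT, h, PySem.Chars.join_singleton]
    · simp [pvTail, pvK, pvSp]
  | cons c t ih =>
    obtain ⟨ihF, ihT⟩ := ih
    by_cases hc : c = ' '
    · subst hc
      have hK0 : pvK (' ' :: t) [] = pvK t [] := by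
        simp [pvK, pvSp]
      refine ⟨fun cur h => ?_, ?_⟩
      · have hrevne : cur.reverse ≠ [] := by simp [h]
        have hsp : pvSp (' ' :: t) cur = cur.reverse :: pvSp t [] := by simp [pvSp]
        have hfilt : ((pvSp (' ' :: t) cur).filter (fun w => w ≠ [])) =
            cur.reverse :: (pvSp t []).filter (fun w => w ≠ []) := by
          rw [hsp, List.filter_cons]; simp [hrevne]
        have hKc : pvK (' ' :: t) cur =
            cur.reverse ++ (if (pvSp t []).filter (fun w => w ≠ []) = [] then []
              else '+' :: pvK t []) := by
          rw [pvK, hfilt, pv_join_cons]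
          by_cases hF : (pvSp t []).filter (fun w => w ≠ []) = []
          · rw [if_pos hF, if_pos hF]
          · rw [if_neg hF, if_neg hF]; rfl
        by_cases hF : (pvSp t []).filter (fun w => w ≠ []) = []
        · have hnil : pvK t [] = [] := (pv_K_nil_iff t).mpr hF
          have hT' : pvT (' ' :: t) = ['+'] := by
            rw [pvT, pv_last_all t (pv_filter_nil_all t [] hF)]; simp
          have hTtail : pvTail true t = [] := by rw [ihT, hnil]; simp
          rw [show pvTail false (' ' :: t) = '+' :: pvTail true t by simp [pvTail]]
          rw [hTtail, hKc, hT', if_pos hF]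
          simp
        · have hnil : pvK t [] ≠ [] := fun hh => hF ((pv_K_nil_iff t).mp hh)
          have ht : t ≠ [] := by
            rintro rfl
            exact hF (by simp [pvSp])
          rw [show pvTail false (' ' :: t) = '+' :: pvTail true t by simp [pvTail]]
          rw [ihT, if_neg hnil, hKc, if_neg hF, pv_T_cons _ _ ht]
          simp
      · by_cases hF : pvK t [] = []
        · rw [show pvTail true (' ' :: t) = pvTail true t by simp [pvTail]]
          rw [ihT, hK0, hF]
          simp
        · have ht : t ≠ [] := by
            rintro rfl
            exact hF (by simp [pvK, pvSp])
          rw [show pvTail true (' ' :: t) = pvTail true t by simp [pvTail]]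
          rw [ihT, hK0, if_neg hF, if_neg hF, pv_T_cons _ _ ht]
    · have hKc : ∀ cur : List Char, pvK (c :: t) cur = pvK t (c :: cur) := by
        intro cur; simp [pvK, pvSp, hc]
      have hT : pvT (c :: t) = pvT t := by
        cases t with
        | nil => simp [pvT, hc]
        | cons b t' => exact pv_T_cons _ _ (by simp)
      refine ⟨fun cur h => ?_, ?_⟩
      · rw [show pvTail false (c :: t) = c :: pvTail false t by simp [pvTail, hc]]
        rw [hKc, hT]
        calc cur.reverse ++ c :: pvTail false t
            = (c :: cur).reverse ++ pvTail false t := by simp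
          _ = pvK t (c :: cur) ++ pvT t := ihF (c :: cur) (by simp)
      · rw [show pvTail true (c :: t) = c :: pvTail false t by simp [pvTail, hc]]
        rw [hKc, hT, if_neg (pv_K_ne t [c] (by simp))]
        simpa using ihF [c] (by simp)

theorem pv_strip_plus (x : List Char) :
    PySem.Chars.stripChars (x ++ ['+']) ['+'] = PySem.Chars.stripChars x ['+'] := by
  simp only [PySem.Chars.stripChars, List.dropWhile_append]
  by_cases h : (List.dropWhile (fun c => List.contains ['+'] c) x).isEmpty = true
  · rw [if_pos h]
    rw [List.isEmpty_iff] at h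
    have hx : ∀ y ∈ x, y = '+' := by
      simpa [List.dropWhile_eq_nil_iff] using h
    simp only [List.dropWhile]
    simp
    intro y hy
    exact hx y ((List.dropWhile_sublist _).subset hy)
  · rw [if_neg h]
    simp [List.reverse_append]

-- ===== VERDICT (by name: the statement is the Claim_ definition above) =====
theorem prepare_query_py_spec : Claim_equal_prepare_query_py := by
  intro text _
  unfold Spec_prepare_query_py prepare_query_py prepare_query_py_alt
  have hfold := pv_foldl_eq_tail text.toList true []
  have hsplit : PySem.Chars.splitOn text.toList [' '] = pvSp text.toList [] := by
    rw [PySem.Chars.splitOn]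
    exact pv_go_eq text.toList (text.toList.length + 1) [] [] (by omega)
  simp only [hfold, hsplit, List.nil_append]
  congr 1
  have hjoin : PySem.Chars.join ['+'] ((pvSp text.toList []).filter (fun w => w ≠ [])) =
      pvK text.toList [] := rfl
  rw [hjoin, (pv_main text.toList).2]
  by_cases hK : pvK text.toList [] = []
  · rw [hK]; simp
  · rw [if_neg hK]
    unfold pvT
    by_cases hL : text.toList.getLast? = some ' '
    · rw [if_pos hL]; exact pv_strip_plus _
    · rw [if_neg hL]; simp
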